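-- pv_equiv track=rewrite | github.com/MontrealCorpusTools/Montreal-Forced-Aligner | montreal_forced_aligner/multiprocessing/ivector.py | get_initial_segmentation
-- ===== SOURCE A (Python) =====
-- def get_initial_segmentation(frames, frame_shift):
--     segs = []
--     cur_seg = None
--     silent_frames = 0
--     non_silent_frames = 0
--     for i, f in enumerate(frames):
--         if int(f) > 0:
--             non_silent_frames += 1
--             if cur_seg is None:
--                 cur_seg = {'begin': i * frame_shift}
--         else:
--             silent_frames += 1
--             if cur_seg is not None:
--                 cur_seg['end'] = (i - 1) * frame_shift
--                 segs.append(cur_seg)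
--                 cur_seg = None
--     total = non_silent_frames + silent_frames
--     return segs
-- ===== SOURCE B (Python) =====
-- def get_initial_segmentation(frames, frame_shift):
--     acts = [int(f) > 0 for f in frames]
--     pairs = list(zip(acts, [False] + acts))  # (activity, previous activity); zip truncates
--     starts = [i for i, (a, p) in enumerate(pairs) if a and not p]
--     ends = [i for i, (a, p) in enumerate(pairs) if p and not a]
--     # zip(starts, ends) drops an unterminated trailing run, matching A
--     return [{'begin': s * frame_shift, 'end': (e - 1) * frame_shift}
--             for s, e in zip(starts, ends)]
-- ===== Notes on version B (the rewrite author's own statement) =====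
-- stated objective: alternative
-- what changed: Replaces A's stateful single scan carrying an open segment dict with a boundary-detection decomposition: pair each frame's activity with its predecessor's via zip, collect run-start and run-end indices by comprehensions, and zip them into segments (zip truncation drops the unterminated trailing run exactly as A does).
import Mathlib
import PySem

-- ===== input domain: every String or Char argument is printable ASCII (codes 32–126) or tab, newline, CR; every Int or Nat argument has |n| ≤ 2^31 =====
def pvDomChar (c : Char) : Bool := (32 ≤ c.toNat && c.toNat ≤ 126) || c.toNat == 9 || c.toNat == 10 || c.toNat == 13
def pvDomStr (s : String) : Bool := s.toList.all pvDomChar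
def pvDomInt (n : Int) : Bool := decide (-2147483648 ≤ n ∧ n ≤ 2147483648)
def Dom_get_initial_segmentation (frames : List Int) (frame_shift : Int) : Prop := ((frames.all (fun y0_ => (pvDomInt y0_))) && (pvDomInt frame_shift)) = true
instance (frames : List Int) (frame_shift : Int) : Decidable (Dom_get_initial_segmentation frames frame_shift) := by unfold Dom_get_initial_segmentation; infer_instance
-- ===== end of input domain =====

-- B rebuilds the segments as zip of run-start and run-end boundary indices (found by
-- comparing each frame's activity with its predecessor's) instead of A's stateful scan;
-- objective: alternative decomposition, same O(n) cost. Return value only; no mutation.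


-- ===== PORT A =====
-- pvStepA is A's loop body; state: (segs, cur_seg, silent_frames, non_silent_frames)
def pvStepA (frame_shift : Int)
    (st : List (List (String × Int)) × Option (List (String × Int)) × Int × Int)
    (p : Int × Int) : List (List (String × Int)) × Option (List (String × Int)) × Int × Int :=
  if p.2 > 0 then
    (st.1,
     (match st.2.1 with
      | none => some [("begin", p.1 * frame_shift)]
      | some c => some c),
     st.2.2.1, st.2.2.2 + 1)
  else
    match st.2.1 with
    | some c => (st.1 ++ [c ++ [("end", (p.1 - 1) * frame_shift)]], none, st.2.2.1 + 1, st.2.2.2)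
    | none => (st.1, none, st.2.2.1 + 1, st.2.2.2)

def get_initial_segmentation (frames : List Int) (frame_shift : Int) : List (List (String × Int)) :=
  ((PySem.List.enumerate frames 0).foldl (pvStepA frame_shift) ([], none, 0, 0)).1

-- ===== PORT B =====
def get_initial_segmentation_alt (frames : List Int) (frame_shift : Int) : List (List (String × Int)) :=
  let acts := frames.map (fun f => decide (f > 0))
  let pairs := acts.zip (false :: acts)
  let starts := ((PySem.List.enumerate pairs 0).filter (fun x => x.2.1 && !x.2.2)).map (·.1)
  let ends := ((PySem.List.enumerate pairs 0).filter (fun x => x.2.2 && !x.2.1)).map (·.1)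
  (starts.zip ends).map (fun se => [("begin", se.1 * frame_shift), ("end", (se.2 - 1) * frame_shift)])

-- ===== PRECONDITION & SPEC =====
def Spec_get_initial_segmentation (frames : List Int) (frame_shift : Int) (out : List (List (String × Int))) : Prop := out = get_initial_segmentation_alt frames frame_shift
instance (frames : List Int) (frame_shift : Int) (out : List (List (String × Int))) : Decidable (Spec_get_initial_segmentation frames frame_shift out) := by unfold Spec_get_initial_segmentation; infer_instance

-- ===== CLAIM (what is proved, stated in full; the proofs are below) =====
def Claim_equal_get_initial_segmentation : Prop := ∀ (frames : List Int) (frame_shift : Int), Dom_get_initial_segmentation frames frame_shift → Spec_get_initial_segmentation frames frame_shift (get_initial_segmentation frames frame_shift)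

-- ===== LEMMAS AND PROOFS =====

-- completed runs (startIndex, firstSilentIndex) of a boolean activity list, scanning
-- from absolute index i with pending run start `pending`; a trailing run is dropped
def pvCore (i : Int) (pending : Option Int) : List Bool → List (Int × Int)
  | [] => []
  | a :: rest =>
    if a then pvCore (i + 1) (some (pending.getD i)) rest
    else
      match pending with
      | some s => (s, i) :: pvCore (i + 1) none rest
      | none => pvCore (i + 1) none rest

def pvMk (frame_shift : Int) (se : Int × Int) : List (String × Int) :=
  [("begin", se.1 * frame_shift), ("end", (se.2 - 1) * frame_shift)]

-- run-start indices of rest, scanning from index i with previous activity prev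
def pvStarts (prev : Bool) (i : Int) : List Bool → List Int
  | [] => []
  | a :: rest => (if a && !prev then [i] else []) ++ pvStarts a (i + 1) rest

def pvEnds (prev : Bool) (i : Int) : List Bool → List Int
  | [] => []
  | a :: rest => (if prev && !a then [i] else []) ++ pvEnds a (i + 1) rest

theorem pvStarts_eq (t : List Bool) : ∀ (prev : Bool) (i : Int),
    ((PySem.List.enumerate (t.zip (prev :: t)) i).filter (fun x => x.2.1 && !x.2.2)).map (·.1)
      = pvStarts prev i t := by
  induction t with
  | nil => intro prev i; simp [pvStarts, PySem.List.enumerate_nil]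
  | cons a rest ih =>
    intro prev i
    simp only [List.zip_cons_cons, PySem.List.enumerate_cons, List.filter_cons, pvStarts]
    by_cases h : (a && !prev) = true <;> simp [h, ih]

theorem pvEnds_eq (t : List Bool) : ∀ (prev : Bool) (i : Int),
    ((PySem.List.enumerate (t.zip (prev :: t)) i).filter (fun x => x.2.2 && !x.2.1)).map (·.1)
      = pvEnds prev i t := by
  induction t with
  | nil => intro prev i; simp [pvEnds, PySem.List.enumerate_nil]
  | cons a rest ih =>
    intro prev i
    simp only [List.zip_cons_cons, PySem.List.enumerate_cons, List.filter_cons, pvEnds]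
    by_cases h : (prev && !a) = true <;> simp [h, ih]

theorem pvZip_core (t : List Bool) : ∀ (i : Int),
    ((pvStarts false i t).zip (pvEnds false i t) = pvCore i none t)
    ∧ (∀ s : Int, (s :: pvStarts true i t).zip (pvEnds true i t) = pvCore i (some s) t) := by
  induction t with
  | nil => intro i; simp [pvStarts, pvEnds, pvCore]
  | cons a rest ih =>
    intro i
    cases a <;>
      simp only [pvStarts, pvEnds, pvCore, Bool.not_false, Bool.not_true, Bool.and_false,
        Bool.and_true, if_true, List.nil_append,
        List.cons_append, Option.getD_none, Option.getD_some] <;>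
      constructor
    · exact (ih (i + 1)).1
    · intro s; simp [List.zip_cons_cons, (ih (i + 1)).1]
    · exact (ih (i + 1)).2 i
    · intro s; exact (ih (i + 1)).2 s

-- A's fold over the enumerated suffix, with pending-run start `pending`, completes
-- `segs` with exactly the runs pvCore finds
theorem pvFoldA (frame_shift : Int) (rest : List Int) :
    ∀ (i : Int) (segs : List (List (String × Int))) (pending : Option Int) (sil ns : Int),
    ((PySem.List.enumerate rest i).foldl (pvStepA frame_shift)
      (segs, pending.map (fun s => [("begin", s * frame_shift)]), sil, ns)).1
    = segs ++ (pvCore i pending (rest.map (fun f => decide (f > 0)))).map (pvMk frame_shift) := by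
  induction rest with
  | nil => intro i segs pending sil ns; simp [pvCore, PySem.List.enumerate_nil]
  | cons f tail ih =>
    intro i segs pending sil ns
    simp only [PySem.List.enumerate_cons, List.foldl_cons, List.map_cons]
    by_cases hf : f > 0
    · have hc : pvCore i pending (true :: tail.map (fun f => decide (f > 0)))
          = pvCore (i + 1) (some (pending.getD i)) (tail.map (fun f => decide (f > 0))) := by
        simp [pvCore]
      cases pending with
      | none =>
        simpa [pvStepA, hf, hc] using ih (i + 1) segs (some i) sil (ns + 1)
      | some s =>
        simpa [pvStepA, hf, hc] using ih (i + 1) segs (some s) sil (ns + 1)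
    · cases pending with
      | none =>
        simpa [pvStepA, hf, pvCore] using ih (i + 1) segs none (sil + 1) ns
      | some s =>
        have := ih (i + 1) (segs ++ [[("begin", s * frame_shift), ("end", (i - 1) * frame_shift)]])
          none (sil + 1) ns
        simpa [pvStepA, hf, pvCore, pvMk] using this
-- ===== VERDICT (by name: the statement is the Claim_ definition above) =====
theorem get_initial_segmentation_spec : Claim_equal_get_initial_segmentation := by
  intro frames frame_shift _
  show get_initial_segmentation frames frame_shift = get_initial_segmentation_alt frames frame_shift
  have hA := pvFoldA frame_shift frames 0 [] none 0 0
  simp only [Option.map_none] at hA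
  simp only [get_initial_segmentation, get_initial_segmentation_alt, hA,
    pvStarts_eq, pvEnds_eq, (pvZip_core (frames.map (fun f => decide (f > 0))) 0).1]
  simp [pvMk]
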